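-- pv_equiv track=rewrite | github.com/Dchamel/python_learning | AdventOfCode/2015/task3.py | two_ways
-- ===== SOURCE A (Python) =====
-- def two_ways(data):
--     data_santa = ''
--     data_robo_santa = ''
--     for index, direction in enumerate(data, start=0):
--         if index % 2 != 0:  # odd
--             data_santa += direction
--         else:  # even
--             data_robo_santa += direction
--     return data_santa, data_robo_santa
-- ===== SOURCE B (Python) =====
-- def two_ways(data):
--     return data[1::2], data[0::2]
-- ===== Notes on version B (the rewrite author's own statement) =====
-- stated objective: idiomatic
-- what changed: Replaces the enumerate loop with per-character parity branching and string concatenation by two extended slices data[1::2] and data[0::2].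
import Mathlib
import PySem

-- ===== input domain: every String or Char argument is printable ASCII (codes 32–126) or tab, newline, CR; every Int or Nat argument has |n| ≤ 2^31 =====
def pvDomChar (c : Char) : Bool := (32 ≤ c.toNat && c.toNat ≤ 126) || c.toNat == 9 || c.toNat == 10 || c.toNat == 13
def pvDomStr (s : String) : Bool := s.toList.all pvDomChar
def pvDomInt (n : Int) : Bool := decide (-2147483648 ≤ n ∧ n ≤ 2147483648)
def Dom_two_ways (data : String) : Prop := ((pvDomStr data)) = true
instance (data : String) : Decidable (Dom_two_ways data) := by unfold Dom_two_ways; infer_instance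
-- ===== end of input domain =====

-- B replaces A's enumerate loop (parity branch, per-character string concatenation)
-- by two extended slices data[1::2] / data[0::2]; idiomatic, same result.


-- ===== PORT A =====
def two_ways (data : String) : String × String :=
  let r := (PySem.List.enumerate data.toList 0).foldl
    (fun (st : String × String) (p : Int × Char) =>
      if PySem.Int.mod p.1 2 ≠ 0 then (st.1 ++ String.ofList [p.2], st.2)
      else (st.1, st.2 ++ String.ofList [p.2]))
    ("", "")
  (r.1, r.2)

-- ===== PORT B =====
-- data[1::2] / data[0::2]; the step 2 is nonzero, so slice? always returns some and getD "" is exact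
def two_ways_alt (data : String) : String × String :=
  ((PySem.Str.slice? data (some 1) none 2).getD "",
   (PySem.Str.slice? data (some 0) none 2).getD "")

-- ===== PRECONDITION & SPEC =====
def Spec_two_ways (data : String) (out : String × String) : Prop := out = two_ways_alt data
instance (data : String) (out : String × String) : Decidable (Spec_two_ways data out) := by unfold Spec_two_ways; infer_instance

-- ===== CLAIM (what is proved, stated in full; the proofs are below) =====
def Claim_equal_two_ways : Prop := ∀ (data : String), Dom_two_ways data → Spec_two_ways data (two_ways data)

-- ===== LEMMAS AND PROOFS =====

/-- every second element of a list, starting with the first -/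
def pvEveryOther : List Char → List Char
  | [] => []
  | x :: t => x :: pvEveryOther t.tail
termination_by l => l.length
decreasing_by simp [List.length_tail]

theorem pvGetElem?_succ_tail (t : List Char) (m : Nat) : t[m + 1]? = t.tail[m]? := by
  cases t <;> simp

theorem pvFm (xs : List Char) :
    List.filterMap (fun (k : Nat) => xs[(2 * (k : Int)).toNat]?) (List.range ((xs.length + 1) / 2))
      = pvEveryOther xs := by
  induction xs using pvEveryOther.induct with
  | case1 => simp [pvEveryOther]
  | case2 x t ih =>
    have hlen : (((x :: t).length + 1) / 2) = (t.tail.length + 1) / 2 + 1 := by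
      cases t with
      | nil => simp
      | cons y u => simp; omega
    rw [hlen, List.range_succ_eq_map, List.filterMap_cons, List.filterMap_map]
    have h0 : ((x :: t)[(2 * ((0:Nat) : Int)).toNat]?) = some x := by simp
    rw [h0]
    have hfun : ((fun (k : Nat) => (x :: t)[(2 * (k : Int)).toNat]?) ∘ Nat.succ)
        = fun (k : Nat) => t.tail[(2 * (k : Int)).toNat]? := by
      funext k
      have h2 : (2 * (((k+1):Nat) : Int)).toNat = (2 * ((k:Nat) : Int)).toNat + 1 + 1 := by
        push_cast; omega
      simp only [Function.comp, Nat.succ_eq_add_one]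
      rw [h2, List.getElem?_cons_succ, pvGetElem?_succ_tail]
    rw [hfun, ih]
    conv_rhs => rw [pvEveryOther]

theorem pvSlice0 (xs : List Char) :
    PySem.List.slice? xs (some 0) none 2 = some (pvEveryOther xs) := by
  simp only [PySem.List.slice?, PySem.List.sliceIndices]
  norm_num
  have hc : (if 0 < xs.length then (((xs.length:Int)+2-1)/2).toNat else 0) = (xs.length+1)/2 := by
    split <;> omega
  rw [hc, pvFm]

theorem pvSlice1 (xs : List Char) :
    PySem.List.slice? xs (some 1) none 2 = some (pvEveryOther xs.tail) := by
  cases xs with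
  | nil => simp [PySem.List.slice?, PySem.List.sliceIndices, pvEveryOther]
  | cons x t =>
    simp only [PySem.List.slice?, PySem.List.sliceIndices]
    norm_num
    have hc : (if 0 < t.length then (((t.length:Int)+2-1)/2).toNat else 0) = (t.length+1)/2 := by
      split <;> omega
    rw [hc]
    have hfun : (fun (a : Nat) => (x :: t)[(1 + 2 * (a : Int)).toNat]?)
        = fun (a : Nat) => t[(2 * (a : Int)).toNat]? := by
      funext a
      have h1 : (1 + 2 * (a : Int)).toNat = (2 * (a : Int)).toNat + 1 := by omega
      rw [h1, List.getElem?_cons_succ]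
    rw [hfun, pvFm]

theorem pvMod2 (i : Int) : PySem.Int.mod i 2 = i % 2 := by
  simp [PySem.Int.mod]; rw [Int.fmod_eq_emod]; simp

theorem pvFoldA (xs : List Char) : ∀ (i : Int) (s r : String),
    (i % 2 = 0 →
      (PySem.List.enumerate xs i).foldl
        (fun (st : String × String) (p : Int × Char) =>
          if PySem.Int.mod p.1 2 ≠ 0 then (st.1 ++ String.ofList [p.2], st.2)
          else (st.1, st.2 ++ String.ofList [p.2]))
        (s, r)
      = (s ++ String.ofList (pvEveryOther xs.tail), r ++ String.ofList (pvEveryOther xs))) ∧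
    (i % 2 ≠ 0 →
      (PySem.List.enumerate xs i).foldl
        (fun (st : String × String) (p : Int × Char) =>
          if PySem.Int.mod p.1 2 ≠ 0 then (st.1 ++ String.ofList [p.2], st.2)
          else (st.1, st.2 ++ String.ofList [p.2]))
        (s, r)
      = (s ++ String.ofList (pvEveryOther xs), r ++ String.ofList (pvEveryOther xs.tail))) := by
  induction xs with
  | nil =>
    intro i s r
    constructor <;> intro _ <;> simp [PySem.List.enumerate_nil, pvEveryOther]
  | cons x t ih =>
    intro i s r
    constructor <;> intro hi <;>
      rw [PySem.List.enumerate_cons, List.foldl_cons]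
    · -- i even: x goes to robo
      rw [if_neg (by rw [pvMod2]; omega)]
      have := (ih (i + 1) s (r ++ String.ofList [x])).2 (by omega)
      rw [this]
      conv_rhs => rw [pvEveryOther]
      simp only [List.tail_cons, Prod.mk.injEq, true_and]
      rw [show x :: pvEveryOther t.tail = [x] ++ pvEveryOther t.tail from rfl,
        String.ofList_append, String.append_assoc]
    · -- i odd: x goes to santa
      rw [if_pos (by rw [pvMod2]; omega)]
      have := (ih (i + 1) (s ++ String.ofList [x]) r).1 (by omega)
      rw [this]
      conv_rhs => rw [pvEveryOther]
      simp only [List.tail_cons, Prod.mk.injEq, and_true]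
      rw [show x :: pvEveryOther t.tail = [x] ++ pvEveryOther t.tail from rfl,
        String.ofList_append, String.append_assoc]

-- ===== VERDICT (by name: the statement is the Claim_ definition above) =====
theorem two_ways_spec : Claim_equal_two_ways := by
  intro data _
  unfold Spec_two_ways two_ways two_ways_alt
  rw [(pvFoldA data.toList 0 "" "").1 (by decide)]
  simp only [PySem.Str.slice?, PySem.Chars.slice?_eq_listSlice?, pvSlice0, pvSlice1]
  simp
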